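-- pv_equiv track=rewrite | github.com/harmslab/latticegpm | latticegpm/svg.py | build
-- ===== SOURCE A (Python) =====
-- def build(sequence, configuration):
--     """ """
--     moves = {"U":[0,-1], "D":[0,1], "R":[1,0], "L":[-1,0]}
--
--     # find boundaries for drawing
--     xmoves, ymoves = [0], [0]
--
--     # Figure out the perimeter of the configuration
--     for i in range(len(configuration)):
--         move = configuration[i]
--         xmoves.append(xmoves[i] + moves[move][0])
--         ymoves.append(ymoves[i] + moves[move][1])
--
--     # bounds of configuration
--     xmax = max(xmoves)
--     xmin = min(xmoves)
--     ymax = max(ymoves)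
--     ymin = min(ymoves)
--     xorigin = 0
--     yorigin = 0
--
--     # add letters to grid
--     xmax2 = xmax + xmax + 3
--     xmin2 = xmin + xmin - 2
--     ymax2 = ymax + ymax + 3
--     ymin2 = ymin + ymin - 2
--
--     # Size of the 2d grid
--     xgrid = abs(xmax2 - xmin2)
--     ygrid = abs(ymax2 - ymin2)
--
--     # Build an empty grid object
--     grid = [[" " for i in range(xgrid)] for j in range(ygrid)]
--
--     # Set dots on grid
--     for i in range(len(grid)):
--         for j in range(len(grid[i])):
--             if i%2==0 and j%2 == 0:
--                 grid[i][j] = "."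
--
--     # Realign origin to fit in grid
--     grid_xorg = xorigin - xmin2
--     grid_yorg = yorigin - ymin2
--
--     # initial position
--     xpos = grid_xorg
--     ypos = grid_yorg
--
--     grid[ypos][xpos] = sequence[0]
--
--     for i in range(len(configuration)):
--
--         let = sequence[i+1]
--         bond = configuration[i].lower()
--         # Get direction
--         step = moves[configuration[i]]
--
--         # Define change in x and y for both edges and letter
--         dx = step[0]
--         dy = step[1]
--
--         # Add bond
--         xpos += dx
--         ypos += dy
--         grid[ypos][xpos] = bond
--
--         # Add residue
--         xpos += dx
--         ypos += dy
--         grid[ypos][xpos] = let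
--
--     return grid
-- ===== SOURCE B (Python) =====
-- def build(sequence, configuration):
--     """ """
--     moves = {"U": (0, -1), "D": (0, 1), "R": (1, 0), "L": (-1, 0)}
--
--     # cumulative coordinates of the residues (prefix sums of the moves)
--     xs, ys = [0], [0]
--     for c in configuration:
--         dx, dy = moves[c]
--         xs.append(xs[-1] + dx)
--         ys.append(ys[-1] + dy)
--
--     xmax, xmin = max(xs), min(xs)
--     ymax, ymin = max(ys), min(ys)
--
--     # same origin / size arithmetic as the drawing convention requires
--     gx = 2 - 2 * xmin
--     gy = 2 - 2 * ymin
--     width = 2 * (xmax - xmin) + 5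
--     height = 2 * (ymax - ymin) + 5
--
--     # all writes, keyed by cell; residue cells and bond cells never collide
--     # (residue offsets are even/even, bond offsets have odd coordinate sum)
--     cells = {}
--     for i in range(len(configuration)):
--         cells[(gy + ys[i] + ys[i + 1], gx + xs[i] + xs[i + 1])] = configuration[i].lower()
--     for i in range(len(configuration) + 1):
--         cells[(gy + 2 * ys[i], gx + 2 * xs[i])] = sequence[i]
--
--     # build the grid in one comprehension: a written cell, else the dot pattern
--     return [[cells.get((r, c), "." if r % 2 == 0 and c % 2 == 0 else " ")
--              for c in range(width)] for r in range(height)]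
-- ===== Notes on version B (the rewrite author's own statement) =====
-- stated objective: alternative
-- what changed: Replaces A's in-place stepping mutation (space grid, dot-setting double loop, then a stateful walk rewriting cells) with a write table: cumulative coordinates are computed once, every residue/bond write goes into a dict keyed by cell, and the grid is produced in a single comprehension reading the dict with the dot pattern as default.
import Mathlib
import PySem

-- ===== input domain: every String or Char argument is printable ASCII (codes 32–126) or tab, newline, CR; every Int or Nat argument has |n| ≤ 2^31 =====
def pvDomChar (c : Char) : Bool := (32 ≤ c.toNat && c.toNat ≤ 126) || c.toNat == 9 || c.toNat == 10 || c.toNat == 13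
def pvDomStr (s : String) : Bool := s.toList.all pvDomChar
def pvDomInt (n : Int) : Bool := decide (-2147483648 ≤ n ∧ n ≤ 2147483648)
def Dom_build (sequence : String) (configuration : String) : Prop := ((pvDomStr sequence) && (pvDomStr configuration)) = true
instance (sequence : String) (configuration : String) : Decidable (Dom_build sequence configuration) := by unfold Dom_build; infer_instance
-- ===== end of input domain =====

-- B replaces A's in-place grid mutation (stateful walk rewriting cells) by a write table keyed
-- by cell plus one grid-building comprehension; equal return value proved on Pre_ (objective: alternative).

-- ===== PORT A =====
-- the literal dict 'moves'; looked up with default [] (a KeyError input is excluded by Pre_)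
def movesDictA : PySem.Dict Char (List Int) :=
  PySem.Dict.mk [('U', [0, -1]), ('D', [0, 1]), ('R', [1, 0]), ('L', [-1, 0])]

-- grid[i][j] = v  (Python list assignment; indices are always in range where A performs it)
def setCell (g : List (List String)) (i j : Int) (v : String) : List (List String) :=
  PySem.List.pySetD g i (PySem.List.pySetD (PySem.List.pyGetD g i []) j v)

-- the 'for i in range(len(configuration))' loop appending to xmoves/ymoves
def A_coords (conf : List Char) : List Int × List Int :=
  (List.range conf.length).foldl
    (fun (p : List Int × List Int) i =>
      let move := conf.getD i ' '   -- configuration[i], i < len(configuration): exact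
      (p.1 ++ [PySem.List.pyGetD p.1 (i : Int) 0 + PySem.List.pyGetD (movesDictA.getD move []) 0 0],
       p.2 ++ [PySem.List.pyGetD p.2 (i : Int) 0 + PySem.List.pyGetD (movesDictA.getD move []) 1 0]))
    ([0], [0])

-- the dot-setting double loop
def A_dots (grid : List (List String)) : List (List String) :=
  (List.range grid.length).foldl
    (fun g (i : Nat) =>
      (List.range (PySem.List.pyGetD g (i : Int) []).length).foldl
        (fun g (j : Nat) => if i % 2 == 0 && j % 2 == 0 then setCell g (i : Int) (j : Int) "." else g)
        g)
    grid

-- the placement walk: state (grid, xpos, ypos)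
def A_walk (seq conf : List Char) (g0 : List (List String)) (x0 y0 : Int) :
    List (List String) × Int × Int :=
  (List.range conf.length).foldl
    (fun (s : List (List String) × Int × Int) i =>
      let lett := seq.getD (i + 1) ' '                     -- sequence[i+1]: exact under Pre_
      let bond := PySem.Chars.lowerChar (conf.getD i ' ')  -- configuration[i].lower()
      let step := movesDictA.getD (conf.getD i ' ') []
      let dx := PySem.List.pyGetD step 0 0
      let dy := PySem.List.pyGetD step 1 0
      let xpos := s.2.1 + dx
      let ypos := s.2.2 + dy
      let g := setCell s.1 ypos xpos (String.ofList [bond])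
      let xpos := xpos + dx
      let ypos := ypos + dy
      let g := setCell g ypos xpos (String.ofList [lett])
      (g, xpos, ypos))
    (g0, x0, y0)

def build (sequence : String) (configuration : String) : List (List String) :=
  let seq := sequence.toList
  let conf := configuration.toList
  let xy := A_coords conf
  let xmoves := xy.1
  let ymoves := xy.2
  let xmax := (PySem.List.max? xmoves (fun x => x)).getD 0   -- max(xmoves): list nonempty, exact
  let xmin := (PySem.List.min? xmoves (fun x => x)).getD 0
  let ymax := (PySem.List.max? ymoves (fun x => x)).getD 0
  let ymin := (PySem.List.min? ymoves (fun x => x)).getD 0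
  let xorigin : Int := 0
  let yorigin : Int := 0
  let xmax2 := xmax + xmax + 3
  let xmin2 := xmin + xmin - 2
  let ymax2 := ymax + ymax + 3
  let ymin2 := ymin + ymin - 2
  let xgrid := |xmax2 - xmin2|
  let ygrid := |ymax2 - ymin2|
  let grid := (PySem.List.pyRange 0 ygrid).map (fun _ => (PySem.List.pyRange 0 xgrid).map (fun _ => " "))
  let grid := A_dots grid
  let grid_xorg := xorigin - xmin2
  let grid_yorg := yorigin - ymin2
  let xpos := grid_xorg
  let ypos := grid_yorg
  let grid := setCell grid ypos xpos (String.ofList [seq.getD 0 ' '])  -- sequence[0]: exact under Pre_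
  (A_walk seq conf grid xpos ypos).1

-- ===== PORT B =====
-- Source B's dict 'moves' of pairs; default (0,0) (a KeyError input is excluded by Pre_)
def movesDictB : PySem.Dict Char (Int × Int) :=
  PySem.Dict.mk [('U', (0, -1)), ('D', (0, 1)), ('R', (1, 0)), ('L', (-1, 0))]

-- the 'for c in configuration' prefix-sum loop (xs[-1] is a negative index read)
def B_coords (conf : List Char) : List Int × List Int :=
  conf.foldl
    (fun (p : List Int × List Int) c =>
      let d := movesDictB.getD c (0, 0)
      (p.1 ++ [PySem.List.pyGetD p.1 (-1) 0 + d.1],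
       p.2 ++ [PySem.List.pyGetD p.2 (-1) 0 + d.2]))
    ([0], [0])

-- the two write loops building the dict 'cells'
def B_cellsDict (seq conf : List Char) (xs ys : List Int) (gx gy : Int) :
    PySem.Dict (Int × Int) String :=
  let d := (List.range conf.length).foldl
    (fun (d : PySem.Dict (Int × Int) String) (i : Nat) =>
      d.insert (gy + PySem.List.pyGetD ys (i : Int) 0 + PySem.List.pyGetD ys ((i : Int) + 1) 0,
                gx + PySem.List.pyGetD xs (i : Int) 0 + PySem.List.pyGetD xs ((i : Int) + 1) 0)
        (String.ofList [PySem.Chars.lowerChar (List.getD conf i ' ')]))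
    (PySem.Dict.mk [])
  (List.range (conf.length + 1)).foldl
    (fun (d : PySem.Dict (Int × Int) String) (i : Nat) =>
      d.insert (gy + 2 * PySem.List.pyGetD ys (i : Int) 0, gx + 2 * PySem.List.pyGetD xs (i : Int) 0)
        (String.ofList [List.getD seq i ' ']))   -- sequence[i]: exact under Pre_
    d

def build_alt (sequence : String) (configuration : String) : List (List String) :=
  let seq := sequence.toList
  let conf := configuration.toList
  let xy := B_coords conf
  let xs := xy.1
  let ys := xy.2
  let xmax := (PySem.List.max? xs (fun x => x)).getD 0
  let xmin := (PySem.List.min? xs (fun x => x)).getD 0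
  let ymax := (PySem.List.max? ys (fun x => x)).getD 0
  let ymin := (PySem.List.min? ys (fun x => x)).getD 0
  let gx := 2 - 2 * xmin
  let gy := 2 - 2 * ymin
  let width := 2 * (xmax - xmin) + 5
  let height := 2 * (ymax - ymin) + 5
  let cells := B_cellsDict seq conf xs ys gx gy
  (PySem.List.pyRange 0 height).map (fun r =>
    (PySem.List.pyRange 0 width).map (fun c =>
      cells.getD (r, c) (if PySem.Int.mod r 2 == 0 && PySem.Int.mod c 2 == 0 then "." else " ")))

-- ===== PRECONDITION & SPEC =====
-- Pre_ excludes exactly the inputs where Python A raises: a configuration character outside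
-- "UDRL" (KeyError) or a sequence shorter than len(configuration)+1 (IndexError).
def Pre_build (sequence : String) (configuration : String) : Prop :=
  (configuration.toList.all (fun c => c == 'U' || c == 'D' || c == 'R' || c == 'L')) = true ∧
  configuration.toList.length < sequence.toList.length

instance (sequence : String) (configuration : String) : Decidable (Pre_build sequence configuration) := by
  unfold Pre_build; infer_instance

def pvWitness_build : String × String := ("ABC", "UR")

def Spec_build (sequence : String) (configuration : String) (out : List (List String)) : Prop :=
  out = build_alt sequence configuration
instance (sequence : String) (configuration : String) (out : List (List String)) : Decidable (Spec_build sequence configuration out) := by unfold Spec_build; infer_instance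

-- ===== CLAIM (what is proved, stated in full; the proofs are below) =====
def Claim_equal_build : Prop := ∀ (sequence : String) (configuration : String), Dom_build sequence configuration → Pre_build sequence configuration → Spec_build sequence configuration (build sequence configuration)

-- ===== LEMMAS AND PROOFS =====

-- direction vectors and cumulative coordinates (proof-only abstractions)
def dxC (c : Char) : Int := if c = 'R' then 1 else if c = 'L' then -1 else 0
def dyC (c : Char) : Int := if c = 'U' then -1 else if c = 'D' then 1 else 0
def Xc (conf : List Char) (i : Nat) : Int := ((conf.take i).map dxC).sum
def Yc (conf : List Char) (i : Nat) : Int := ((conf.take i).map dyC).sum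
def xsL (conf : List Char) : List Int := (List.range (conf.length + 1)).map (Xc conf)
def ysL (conf : List Char) : List Int := (List.range (conf.length + 1)).map (Yc conf)

-- the write lists
def resW (seq conf : List Char) (gx gy : Int) (i : Nat) : (Int × Int) × String :=
  ((gy + 2 * Yc conf i, gx + 2 * Xc conf i), String.ofList [seq.getD i ' '])
def bondW (conf : List Char) (gx gy : Int) (i : Nat) : (Int × Int) × String :=
  ((gy + Yc conf i + Yc conf (i + 1), gx + Xc conf i + Xc conf (i + 1)),
   String.ofList [PySem.Chars.lowerChar (conf.getD i ' ')])
def applyW (g : List (List String)) (w : (Int × Int) × String) : List (List String) :=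
  setCell g w.1.1 w.1.2 w.2
def applyWs (g : List (List String)) (ws : List ((Int × Int) × String)) : List (List String) :=
  ws.foldl applyW g
def lastVal (ws : List ((Int × Int) × String)) (q : Int × Int) : Option String :=
  ((ws.filter (fun w => w.1 == q)).getLast?).map (·.2)

def Rect (g : List (List String)) (H W : Nat) : Prop :=
  g.length = H ∧ ∀ r : Nat, r < H → (g.getD r []).length = W
def readC (g : List (List String)) (r c : Nat) : String := (g.getD r []).getD c " "
def InB (H W : Nat) (q : Int × Int) : Prop :=
  0 ≤ q.1 ∧ q.1 < (H : Int) ∧ 0 ≤ q.2 ∧ q.2 < (W : Int)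

def spRow (W : Nat) : List String := (List.range W).map (fun _ => " ")
def dotsRow (W : Nat) (i : Nat) : List String :=
  (List.range W).map (fun j => if i % 2 == 0 && j % 2 == 0 then "." else " ")

-- ---- moves-dict lookups ----
lemma moves_cases (c : Char) (P : Char → Prop)
    (hU : P 'U') (hD : P 'D') (hR : P 'R') (hL : P 'L')
    (hO : c ≠ 'U' → c ≠ 'D' → c ≠ 'R' → c ≠ 'L' → P c) : P c := by
  by_cases h1 : c = 'U'
  · subst h1; exact hU
  · by_cases h2 : c = 'D'
    · subst h2; exact hD
    · by_cases h3 : c = 'R'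
      · subst h3; exact hR
      · by_cases h4 : c = 'L'
        · subst h4; exact hL
        · exact hO h1 h2 h3 h4

lemma movesA_getD_other (c : Char) (h1 : c ≠ 'U') (h2 : c ≠ 'D') (h3 : c ≠ 'R') (h4 : c ≠ 'L') :
    movesDictA.getD c [] = [] := by
  have e1 : ('U' == c) = false := beq_eq_false_iff_ne.mpr (Ne.symm h1)
  have e2 : ('D' == c) = false := beq_eq_false_iff_ne.mpr (Ne.symm h2)
  have e3 : ('R' == c) = false := beq_eq_false_iff_ne.mpr (Ne.symm h3)
  have e4 : ('L' == c) = false := beq_eq_false_iff_ne.mpr (Ne.symm h4)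
  simp [movesDictA, PySem.Dict.getD, PySem.Dict.get?, List.find?, e1, e2, e3, e4]

lemma movesB_getD_other (c : Char) (h1 : c ≠ 'U') (h2 : c ≠ 'D') (h3 : c ≠ 'R') (h4 : c ≠ 'L') :
    movesDictB.getD c (0, 0) = (0, 0) := by
  have e1 : ('U' == c) = false := beq_eq_false_iff_ne.mpr (Ne.symm h1)
  have e2 : ('D' == c) = false := beq_eq_false_iff_ne.mpr (Ne.symm h2)
  have e3 : ('R' == c) = false := beq_eq_false_iff_ne.mpr (Ne.symm h3)
  have e4 : ('L' == c) = false := beq_eq_false_iff_ne.mpr (Ne.symm h4)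
  simp [movesDictB, PySem.Dict.getD, PySem.Dict.get?, List.find?, e1, e2, e3, e4]

lemma movesA_dx (c : Char) : PySem.List.pyGetD (movesDictA.getD c []) 0 0 = dxC c := by
  refine moves_cases c (fun c => PySem.List.pyGetD (movesDictA.getD c []) 0 0 = dxC c) rfl rfl rfl rfl (fun h1 h2 h3 h4 => ?_)
  show _ = _
  rw [movesA_getD_other c h1 h2 h3 h4]; simp [dxC, h3, h4]; rfl
lemma movesA_dy (c : Char) : PySem.List.pyGetD (movesDictA.getD c []) 1 0 = dyC c := by
  refine moves_cases c (fun c => PySem.List.pyGetD (movesDictA.getD c []) 1 0 = dyC c) rfl rfl rfl rfl (fun h1 h2 h3 h4 => ?_)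
  show _ = _
  rw [movesA_getD_other c h1 h2 h3 h4]; simp [dyC, h1, h2]; rfl
lemma movesB_fst (c : Char) : (movesDictB.getD c (0, 0)).1 = dxC c := by
  refine moves_cases c (fun c => (movesDictB.getD c (0, 0)).1 = dxC c) rfl rfl rfl rfl (fun h1 h2 h3 h4 => ?_)
  show _ = _
  rw [movesB_getD_other c h1 h2 h3 h4]; simp [dxC, h3, h4]
lemma movesB_snd (c : Char) : (movesDictB.getD c (0, 0)).2 = dyC c := by
  refine moves_cases c (fun c => (movesDictB.getD c (0, 0)).2 = dyC c) rfl rfl rfl rfl (fun h1 h2 h3 h4 => ?_)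
  show _ = _
  rw [movesB_getD_other c h1 h2 h3 h4]; simp [dyC, h1, h2]

-- ---- cumulative coordinates ----
lemma Xc_succ (conf : List Char) (k : Nat) (hk : k < conf.length) :
    Xc conf (k + 1) = Xc conf k + dxC (conf.getD k ' ') := by
  unfold Xc
  rw [List.take_add_one, List.getElem?_eq_getElem hk, List.map_append, List.sum_append,
      List.getD_eq_getElem _ _ hk]
  simp
lemma Yc_succ (conf : List Char) (k : Nat) (hk : k < conf.length) :
    Yc conf (k + 1) = Yc conf k + dyC (conf.getD k ' ') := by
  unfold Yc
  rw [List.take_add_one, List.getElem?_eq_getElem hk, List.map_append, List.sum_append,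
      List.getD_eq_getElem _ _ hk]
  simp

lemma pyGetD_concat_neg_one {α : Type} (l : List α) (a : α) (d : α) :
    PySem.List.pyGetD (l ++ [a]) (-1) d = a := by
  simp [PySem.List.pyGetD, PySem.List.pyGet?, PySem.List.pyIdx?]

lemma A_coords_aux (conf : List Char) (k : Nat) (hk : k ≤ conf.length) :
    (List.range k).foldl
      (fun (p : List Int × List Int) i =>
        let move := conf.getD i ' '
        (p.1 ++ [PySem.List.pyGetD p.1 (i : Int) 0 + PySem.List.pyGetD (movesDictA.getD move []) 0 0],
         p.2 ++ [PySem.List.pyGetD p.2 (i : Int) 0 + PySem.List.pyGetD (movesDictA.getD move []) 1 0]))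
      ([0], [0])
    = ((List.range (k + 1)).map (Xc conf), (List.range (k + 1)).map (Yc conf)) := by
  induction k with
  | zero => simp [Xc, Yc]
  | succ m ih =>
      have hml : m < conf.length := hk
      rw [List.range_succ, List.foldl_append, ih (Nat.le_of_succ_le hk), List.foldl_cons,
          List.foldl_nil]
      dsimp only
      rw [movesA_dx, movesA_dy, PySem.List.pyGetD_natCast, PySem.List.pyGetD_natCast,
          PySem.List.getD_map_range (Xc conf) (m + 1) m 0 (Nat.lt_succ_self m),
          PySem.List.getD_map_range (Yc conf) (m + 1) m 0 (Nat.lt_succ_self m),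
          ← Xc_succ conf m hml, ← Yc_succ conf m hml]
      rw [show m + 1 + 1 = (m + 1) + 1 from rfl, List.range_succ (n := m + 1), List.map_append,
          List.map_append]
      simp

lemma A_coords_eq (conf : List Char) : A_coords conf = (xsL conf, ysL conf) := by
  unfold A_coords xsL ysL
  exact A_coords_aux conf conf.length le_rfl
lemma Xc_append_of_le (l : List Char) (c : Char) (i : Nat) (hi : i ≤ l.length) :
    Xc (l ++ [c]) i = Xc l i := by
  unfold Xc; rw [List.take_append_of_le_length hi]
lemma Yc_append_of_le (l : List Char) (c : Char) (i : Nat) (hi : i ≤ l.length) :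
    Yc (l ++ [c]) i = Yc l i := by
  unfold Yc; rw [List.take_append_of_le_length hi]

lemma xsL_append (l : List Char) (c : Char) :
    xsL (l ++ [c]) = xsL l ++ [Xc l l.length + dxC c] := by
  unfold xsL
  rw [List.length_append, List.length_singleton,
      show l.length + 1 + 1 = (l.length + 1) + 1 from rfl, List.range_succ, List.map_append]
  congr 1
  · exact List.map_congr_left (fun i hi => Xc_append_of_le l c i (by
      simp only [List.mem_range] at hi; omega))
  · have h : Xc (l ++ [c]) (l.length + 1) = Xc l l.length + dxC c := by
      rw [Xc_succ (l ++ [c]) l.length (by simp), Xc_append_of_le l c l.length le_rfl]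
      congr 2
      rw [List.getD_eq_getElem _ _ (by simp : l.length < (l ++ [c]).length)]
      simp
    simp [h]

lemma ysL_append (l : List Char) (c : Char) :
    ysL (l ++ [c]) = ysL l ++ [Yc l l.length + dyC c] := by
  unfold ysL
  rw [List.length_append, List.length_singleton,
      show l.length + 1 + 1 = (l.length + 1) + 1 from rfl, List.range_succ, List.map_append]
  congr 1
  · exact List.map_congr_left (fun i hi => Yc_append_of_le l c i (by
      simp only [List.mem_range] at hi; omega))
  · have h : Yc (l ++ [c]) (l.length + 1) = Yc l l.length + dyC c := by
      rw [Yc_succ (l ++ [c]) l.length (by simp), Yc_append_of_le l c l.length le_rfl]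
      congr 2
      rw [List.getD_eq_getElem _ _ (by simp : l.length < (l ++ [c]).length)]
      simp
    simp [h]

lemma xsL_last (l : List Char) (d : Int) : PySem.List.pyGetD (xsL l) (-1) d = Xc l l.length := by
  have : xsL l = (List.range l.length).map (Xc l) ++ [Xc l l.length] := by
    unfold xsL; rw [List.range_succ, List.map_append]; rfl
  rw [this, pyGetD_concat_neg_one]
lemma ysL_last (l : List Char) (d : Int) : PySem.List.pyGetD (ysL l) (-1) d = Yc l l.length := by
  have : ysL l = (List.range l.length).map (Yc l) ++ [Yc l l.length] := by
    unfold ysL; rw [List.range_succ, List.map_append]; rfl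
  rw [this, pyGetD_concat_neg_one]

lemma B_coords_eq (conf : List Char) : B_coords conf = (xsL conf, ysL conf) := by
  induction conf using List.reverseRecOn with
  | nil => rfl
  | append_singleton l c ih =>
      unfold B_coords at ih ⊢
      rw [List.foldl_append, ih, List.foldl_cons, List.foldl_nil]
      dsimp only
      rw [movesB_fst, movesB_snd, xsL_last, ysL_last, xsL_append, ysL_append]

-- ---- grid reading / writing ----
lemma setCell_eq_set (g : List (List String)) (i j : Int) (v : String) (hi : 0 ≤ i) (hj : 0 ≤ j) :
    setCell g i j v = g.set i.toNat ((g.getD i.toNat []).set j.toNat v) := by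
  obtain ⟨n, rfl⟩ : ∃ n : Nat, i = (n : Int) := ⟨i.toNat, by omega⟩
  obtain ⟨m, rfl⟩ : ∃ m : Nat, j = (m : Int) := ⟨j.toNat, by omega⟩
  unfold setCell
  rw [PySem.List.pySetD_of_nonneg _ _ hi, PySem.List.pySetD_of_nonneg _ _ hj,
      PySem.List.pyGetD_natCast]
  simp

lemma getD_set_self (g : List (List String)) (r : Nat) (row : List String) (hr : r < g.length) :
    (g.set r row).getD r [] = row := by
  rw [List.getD_eq_getElem?_getD, List.getElem?_set, if_pos rfl, if_pos hr]; rfl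

lemma getD_set_ne (g : List (List String)) (r r' : Nat) (row : List String) (h : r ≠ r') :
    (g.set r row).getD r' [] = g.getD r' [] := by
  rw [List.getD_eq_getElem?_getD, List.getElem?_set, if_neg h, ← List.getD_eq_getElem?_getD]

lemma rect_setCell (g : List (List String)) (H W : Nat) (hg : Rect g H W) (i j : Int) (v : String)
    (hb : InB H W (i, j)) : Rect (setCell g i j v) H W := by
  obtain ⟨hlen, hrow⟩ := hg
  obtain ⟨hi0, hiH, hj0, hjW⟩ := hb
  rw [setCell_eq_set g i j v hi0 hj0]
  refine ⟨by simp [hlen], fun r hr => ?_⟩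
  by_cases h : i.toNat = r
  · subst h
    rw [getD_set_self _ _ _ (by omega), List.length_set]
    exact hrow _ hr
  · rw [getD_set_ne _ _ _ _ h]
    exact hrow r hr

lemma readC_setCell (g : List (List String)) (H W : Nat) (hg : Rect g H W) (i j : Int) (v : String)
    (hb : InB H W (i, j)) (r c : Nat) (hr : r < H) (hc : c < W) :
    readC (setCell g i j v) r c = if ((r : Int), (c : Int)) = (i, j) then v else readC g r c := by
  obtain ⟨hlen, hrowlen⟩ := hg
  obtain ⟨hi0, hiH, hj0, hjW⟩ := hb
  rw [setCell_eq_set g i j v hi0 hj0]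
  unfold readC
  by_cases h : i.toNat = r
  · rw [← h, getD_set_self _ _ _ (by omega)]
    by_cases h2 : j.toNat = c
    · rw [← h2]
      rw [List.getD_eq_getElem?_getD, List.getElem?_set, if_pos rfl,
          if_pos (by rw [hrowlen i.toNat (by omega)]; omega)]
      rw [if_pos (by simp; omega)]
      rfl
    · rw [List.getD_eq_getElem?_getD, List.getElem?_set, if_neg h2,
          ← List.getD_eq_getElem?_getD, if_neg (by simp; omega)]
  · rw [getD_set_ne _ _ _ _ h, if_neg (by simp; omega)]

lemma rect_applyWs (ws : List ((Int × Int) × String)) (g : List (List String)) (H W : Nat)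
    (hg : Rect g H W) (hws : ∀ w ∈ ws, InB H W w.1) : Rect (applyWs g ws) H W := by
  induction ws generalizing g with
  | nil => exact hg
  | cons w t ih =>
      exact ih (applyW g w)
        (rect_setCell g H W hg w.1.1 w.1.2 w.2 (hws w (List.mem_cons_self)))
        (fun w' hw' => hws w' (List.mem_cons_of_mem _ hw'))

lemma readC_applyWs (ws : List ((Int × Int) × String)) (g : List (List String)) (H W : Nat)
    (hg : Rect g H W) (hws : ∀ w ∈ ws, InB H W w.1) (r c : Nat) (hr : r < H) (hc : c < W) :
    readC (applyWs g ws) r c = (lastVal ws ((r : Int), (c : Int))).getD (readC g r c) := by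
  induction ws generalizing g with
  | nil => simp [applyWs, lastVal]
  | cons w t ih =>
      have hb := hws w (List.mem_cons_self)
      have step : readC (applyW g w) r c =
          if ((r : Int), (c : Int)) = w.1 then w.2 else readC g r c := by
        have := readC_setCell g H W hg w.1.1 w.1.2 w.2 (by exact hb) r c hr hc
        simpa [applyW] using this
      have hrect : Rect (applyW g w) H W :=
        rect_setCell g H W hg w.1.1 w.1.2 w.2 hb
      have ihw := ih (applyW g w) hrect (fun w' hw' => hws w' (List.mem_cons_of_mem _ hw'))
      show readC (applyWs (applyW g w) t) r c = _
      rw [ihw, step]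
      unfold lastVal
      by_cases h : w.1 == ((r : Int), (c : Int))
      · simp only [List.filter_cons, h, if_true, List.getLast?_cons]
        have hkey : ((r : Int), (c : Int)) = w.1 := (eq_of_beq h).symm
        rw [if_pos hkey]
        cases e : (t.filter (fun w' => w'.1 == ((r : Int), (c : Int)))).getLast? with
        | none => simp [e]
        | some a => simp [e]
      · have hf : (w.1 == ((r : Int), (c : Int))) = false := by simpa using h
        simp only [List.filter_cons, hf, Bool.false_eq_true, if_false]
        have hkey : ¬ (((r : Int), (c : Int)) = w.1) :=
          fun he => h (by rw [← he]; exact beq_self_eq_true _)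
        rw [if_neg hkey]

-- ---- the dot grid ----
def mixRow (W k m : Nat) : List String :=
  (List.range W).map (fun j => if j < m ∧ k % 2 = 0 ∧ j % 2 = 0 then "." else " ")

lemma mixRow_zero (W k : Nat) : mixRow W k 0 = spRow W := by
  unfold mixRow spRow
  exact List.map_congr_left (fun j _ => by simp)

lemma mixRow_full (W k : Nat) : mixRow W k W = dotsRow W k := by
  unfold mixRow dotsRow
  refine List.map_congr_left (fun j hj => ?_)
  simp only [List.mem_range] at hj
  by_cases h1 : k % 2 = 0 <;> by_cases h2 : j % 2 = 0 <;>
    simp [h1, h2, hj, Nat.beq_eq_true_eq]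

lemma mixRow_set (W k m : Nat) (hm : m < W) (hc : k % 2 = 0 ∧ m % 2 = 0) :
    (mixRow W k m).set m "." = mixRow W k (m + 1) := by
  apply List.ext_getElem (by simp [mixRow])
  intro j h1 h2
  simp only [mixRow, List.getElem_set, List.getElem_map, List.getElem_range] at *
  by_cases h : m = j
  · subst h; simp [hm, hc]
  · rw [if_neg h]
    split_ifs <;> first | rfl | omega

lemma mixRow_skip (W k m : Nat) (hc : ¬ (k % 2 = 0 ∧ m % 2 = 0)) :
    mixRow W k (m + 1) = mixRow W k m := by
  unfold mixRow
  refine List.map_congr_left (fun j hj => ?_)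
  by_cases h : m = j
  · subst h; rw [if_neg (by tauto), if_neg (by tauto)]
  · split_ifs <;> first | rfl | omega

lemma set_getD_self (g : List (List String)) (k : Nat) (hk : k < g.length) :
    g.set k (g.getD k []) = g := by
  rw [List.getD_eq_getElem _ _ hk]
  exact List.set_getElem_self hk

lemma inner_dots (W : Nat) (g : List (List String)) (k : Nat) (hk : k < g.length)
    (hrow : g.getD k [] = spRow W) (m : Nat) (hm : m ≤ W) :
    (List.range m).foldl
      (fun g (j : Nat) => if k % 2 == 0 && j % 2 == 0 then setCell g (k : Int) (j : Int) "." else g) g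
    = g.set k (mixRow W k m) := by
  induction m with
  | zero =>
      rw [List.range_zero, List.foldl_nil, mixRow_zero, ← hrow, set_getD_self g k hk]
  | succ m ih =>
      rw [List.range_succ, List.foldl_append, ih (by omega), List.foldl_cons, List.foldl_nil]
      by_cases hc : k % 2 = 0 ∧ m % 2 = 0
      · have hb : (k % 2 == 0 && m % 2 == 0) = true := by
          simp [hc.1, hc.2]
        rw [if_pos hb, setCell_eq_set _ _ _ _ (by omega) (by omega)]
        simp only [Int.toNat_natCast]
        rw [getD_set_self _ _ _ hk, List.set_set, mixRow_set W k m (by omega) hc]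
      · have hb : (k % 2 == 0 && m % 2 == 0) = false := by
          rcases Nat.lt_or_ge 0 1 with _ | _
          · by_cases h1 : k % 2 = 0 <;> by_cases h2 : m % 2 = 0 <;> simp_all
          · omega
        rw [if_neg (by simp [hb]), mixRow_skip W k m hc]

def mixG (H W k : Nat) : List (List String) :=
  (List.range H).map (fun i => if i < k then dotsRow W i else spRow W)

lemma outer_dots (H W : Nat) (k : Nat) (hk : k ≤ H) :
    (List.range k).foldl
      (fun g (i : Nat) =>
        (List.range (PySem.List.pyGetD g (i : Int) []).length).foldl
          (fun g (j : Nat) => if i % 2 == 0 && j % 2 == 0 then setCell g (i : Int) (j : Int) "." else g)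
          g)
      ((List.range H).map (fun _ => spRow W))
    = mixG H W k := by
  induction k with
  | zero =>
      rw [List.range_zero, List.foldl_nil]
      exact (List.map_congr_left (fun i _ => by simp [mixG])).symm
  | succ k ih =>
      rw [List.range_succ, List.foldl_append, ih (by omega), List.foldl_cons, List.foldl_nil]
      have hkH : k < H := hk
      have hrow : (mixG H W k).getD k [] = spRow W := by
        unfold mixG
        rw [PySem.List.getD_map_range _ H k [] hkH]
        simp
      have hlen : (mixG H W k).length = H := by simp [mixG]
      have hget : PySem.List.pyGetD (mixG H W k) (k : Int) [] = spRow W := by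
        rw [PySem.List.pyGetD_natCast, hrow]
      rw [hget, show (spRow W).length = W by simp [spRow]]
      rw [inner_dots W (mixG H W k) k (by omega) hrow W le_rfl, mixRow_full]
      apply List.ext_getElem (by simp [mixG])
      intro j h1 h2
      simp only [mixG, List.getElem_set, List.getElem_map, List.getElem_range] at *
      by_cases h : k = j
      · subst h; simp
      · rw [if_neg h]
        have : (j < k + 1) ↔ (j < k) := by omega
        simp [this]

lemma A_dots_eq (H W : Nat) :
    A_dots ((List.range H).map (fun _ => spRow W)) = (List.range H).map (dotsRow W) := by
  unfold A_dots
  rw [show ((List.range H).map (fun _ => spRow W)).length = H by simp]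
  rw [outer_dots H W H le_rfl]
  exact List.map_congr_left (fun i hi => by
    simp only [List.mem_range] at hi
    simp [mixG, hi])

-- ---- the placement walk is the write list ----
lemma A_walk_aux (seq conf : List Char) (g0 : List (List String)) (gx gy : Int)
    (k : Nat) (hk : k ≤ conf.length) :
    (List.range k).foldl
      (fun (s : List (List String) × Int × Int) i =>
        let lett := seq.getD (i + 1) ' '
        let bond := PySem.Chars.lowerChar (conf.getD i ' ')
        let step := movesDictA.getD (conf.getD i ' ') []
        let dx := PySem.List.pyGetD step 0 0
        let dy := PySem.List.pyGetD step 1 0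
        let xpos := s.2.1 + dx
        let ypos := s.2.2 + dy
        let g := setCell s.1 ypos xpos (String.ofList [bond])
        let xpos := xpos + dx
        let ypos := ypos + dy
        let g := setCell g ypos xpos (String.ofList [lett])
        (g, xpos, ypos))
      (g0, gx, gy)
    = (applyWs g0 ((List.range k).flatMap
          (fun i => [bondW conf gx gy i, resW seq conf gx gy (i + 1)])),
       gx + 2 * Xc conf k, gy + 2 * Yc conf k) := by
  induction k with
  | zero => simp [applyWs, Xc, Yc]
  | succ k ih =>
      have hkl : k < conf.length := hk
      rw [List.range_succ, List.foldl_append, ih (by omega), List.foldl_cons, List.foldl_nil,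
          List.flatMap_append, List.flatMap_cons, List.flatMap_nil, List.append_nil]
      dsimp only
      rw [movesA_dx, movesA_dy]
      have ex2 : gx + 2 * Xc conf k + dxC (conf.getD k ' ') + dxC (conf.getD k ' ')
          = gx + 2 * Xc conf (k + 1) := by rw [Xc_succ conf k hkl]; ring
      have ey2 : gy + 2 * Yc conf k + dyC (conf.getD k ' ') + dyC (conf.getD k ' ')
          = gy + 2 * Yc conf (k + 1) := by rw [Yc_succ conf k hkl]; ring
      have ex : gx + 2 * Xc conf k + dxC (conf.getD k ' ') = gx + Xc conf k + Xc conf (k + 1) := by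
        rw [Xc_succ conf k hkl]; ring
      have ey : gy + 2 * Yc conf k + dyC (conf.getD k ' ') = gy + Yc conf k + Yc conf (k + 1) := by
        rw [Yc_succ conf k hkl]; ring
      rw [ex2, ey2, ex, ey]
      have happ : ∀ (G : List (List String)) (l : List ((Int × Int) × String))
          (w1 w2 : (Int × Int) × String),
          applyWs G (l ++ [w1, w2]) = applyW (applyW (applyWs G l) w1) w2 := by
        intros; simp [applyWs, List.foldl_append]
      rw [happ]
      unfold applyW bondW resW
      rfl

lemma A_walk_eq (seq conf : List Char) (g0 : List (List String)) (gx gy : Int) :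
    A_walk seq conf g0 gx gy =
      (applyWs g0 ((List.range conf.length).flatMap
          (fun i => [bondW conf gx gy i, resW seq conf gx gy (i + 1)])),
       gx + 2 * Xc conf conf.length, gy + 2 * Yc conf conf.length) := by
  unfold A_walk
  exact A_walk_aux seq conf g0 gx gy conf.length le_rfl

-- ---- dict lookups are last writes ----
lemma getD_foldl_insert {α : Type} (l : List α) (k : α → Int × Int) (v : α → String)
    (d : PySem.Dict (Int × Int) String) (q : Int × Int) (dflt : String) :
    ((l.foldl (fun d a => d.insert (k a) (v a)) d).getD q dflt) =
      (((l.filter (fun a => k a == q)).getLast?).map v).getD (d.getD q dflt) := by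
  induction l using List.reverseRecOn with
  | nil => simp
  | append_singleton t a ih =>
      rw [List.foldl_append, List.foldl_cons, List.foldl_nil, PySem.Dict.getD_insert,
        List.filter_append]
      by_cases h : k a = q
      · simp [List.filter_cons, h, List.getLast?_append]
      · have hb : (k a == q) = false := beq_eq_false_iff_ne.mpr h
        simp [List.filter_cons, hb, Ne.symm h, ih]

-- ---- filtering the interleaved write list ----
lemma flatMap_filter_singleton {α β : Type} (l : List α) (g : α → β) (p : β → Bool) :
    l.flatMap (fun i => List.filter p [g i]) = List.filter p (l.map g) := by
  induction l with
  | nil => simp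
  | cons a t ih =>
      rw [List.flatMap_cons, List.map_cons, List.filter_cons, ih]
      cases h : p (g a)
      · simp [List.filter_cons, h]
      · simp [List.filter_cons, h]

-- ---- canonical form shared by both ports ----
def bondWs (conf : List Char) (gx gy : Int) : List ((Int × Int) × String) :=
  (List.range conf.length).map (bondW conf gx gy)
def resWs (seq conf : List Char) (gx gy : Int) : List ((Int × Int) × String) :=
  (List.range (conf.length + 1)).map (resW seq conf gx gy)

def xminC (conf : List Char) : Int := (PySem.List.min? (xsL conf) (fun x => x)).getD 0
def xmaxC (conf : List Char) : Int := (PySem.List.max? (xsL conf) (fun x => x)).getD 0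
def yminC (conf : List Char) : Int := (PySem.List.min? (ysL conf) (fun x => x)).getD 0
def ymaxC (conf : List Char) : Int := (PySem.List.max? (ysL conf) (fun x => x)).getD 0
def gxC (conf : List Char) : Int := 2 - 2 * xminC conf
def gyC (conf : List Char) : Int := 2 - 2 * yminC conf
def WC (conf : List Char) : Nat := (2 * (xmaxC conf - xminC conf) + 5).toNat
def HC (conf : List Char) : Nat := (2 * (ymaxC conf - yminC conf) + 5).toNat

def canonical (seq conf : List Char) : List (List String) :=
  (List.range (HC conf)).map (fun (r : Nat) => (List.range (WC conf)).map (fun (c : Nat) =>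
    (lastVal (resWs seq conf (gxC conf) (gyC conf)) ((r : Int), (c : Int))).getD
      ((lastVal (bondWs conf (gxC conf) (gyC conf)) ((r : Int), (c : Int))).getD
        (if r % 2 == 0 && c % 2 == 0 then "." else " "))))

-- ---- bounds ----
lemma mem_xsL (conf : List Char) (i : Nat) (hi : i ≤ conf.length) : Xc conf i ∈ xsL conf := by
  unfold xsL
  exact List.mem_map.mpr ⟨i, List.mem_range.mpr (by omega), rfl⟩
lemma mem_ysL (conf : List Char) (i : Nat) (hi : i ≤ conf.length) : Yc conf i ∈ ysL conf := by
  unfold ysL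
  exact List.mem_map.mpr ⟨i, List.mem_range.mpr (by omega), rfl⟩

lemma minD_le_of_mem (xs : List Int) (a : Int) (ha : a ∈ xs) :
    (PySem.List.min? xs (fun x => x)).getD 0 ≤ a := by
  cases e : PySem.List.min? xs (fun x => x) with
  | none => exact absurd ((PySem.List.min?_eq_none_iff xs _).mp e) (by rintro rfl; cases ha)
  | some m => simpa using PySem.List.min?_isMin e a ha
lemma le_maxD_of_mem (xs : List Int) (a : Int) (ha : a ∈ xs) :
    a ≤ (PySem.List.max? xs (fun x => x)).getD 0 := by
  cases e : PySem.List.max? xs (fun x => x) with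
  | none => exact absurd ((PySem.List.max?_eq_none_iff xs _).mp e) (by rintro rfl; cases ha)
  | some m => simpa using PySem.List.max?_isMax e a ha

lemma x_bounds (conf : List Char) (i : Nat) (hi : i ≤ conf.length) :
    xminC conf ≤ Xc conf i ∧ Xc conf i ≤ xmaxC conf :=
  ⟨minD_le_of_mem _ _ (mem_xsL conf i hi), le_maxD_of_mem _ _ (mem_xsL conf i hi)⟩
lemma y_bounds (conf : List Char) (i : Nat) (hi : i ≤ conf.length) :
    yminC conf ≤ Yc conf i ∧ Yc conf i ≤ ymaxC conf :=
  ⟨minD_le_of_mem _ _ (mem_ysL conf i hi), le_maxD_of_mem _ _ (mem_ysL conf i hi)⟩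
lemma Xc_zero (conf : List Char) : Xc conf 0 = 0 := rfl
lemma Yc_zero (conf : List Char) : Yc conf 0 = 0 := rfl

lemma WC_cast (conf : List Char) : ((WC conf : Nat) : Int) = 2 * (xmaxC conf - xminC conf) + 5 := by
  have h := x_bounds conf 0 (by omega)
  rw [Xc_zero] at h
  unfold WC
  omega
lemma HC_cast (conf : List Char) : ((HC conf : Nat) : Int) = 2 * (ymaxC conf - yminC conf) + 5 := by
  have h := y_bounds conf 0 (by omega)
  rw [Yc_zero] at h
  unfold HC
  omega

lemma resW_inB (seq conf : List Char) (i : Nat) (hi : i ≤ conf.length) :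
    InB (HC conf) (WC conf) (resW seq conf (gxC conf) (gyC conf) i).1 := by
  have hx := x_bounds conf i hi
  have hy := y_bounds conf i hi
  have hW := WC_cast conf
  have hH := HC_cast conf
  unfold InB resW gxC gyC
  constructor
  · simp only; omega
  refine ⟨by rw [hH]; simp only; omega, by simp only; omega, by rw [hW]; simp only; omega⟩
lemma bondW_inB (conf : List Char) (seq : List Char) (i : Nat) (hi : i < conf.length) :
    InB (HC conf) (WC conf) (bondW conf (gxC conf) (gyC conf) i).1 := by
  have hx := x_bounds conf i (by omega)
  have hy := y_bounds conf i (by omega)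
  have hx2 := x_bounds conf (i + 1) (by omega)
  have hy2 := y_bounds conf (i + 1) (by omega)
  have hW := WC_cast conf
  have hH := HC_cast conf
  unfold InB bondW gxC gyC
  constructor
  · simp only; omega
  refine ⟨by rw [hH]; simp only; omega, by simp only; omega, by rw [hW]; simp only; omega⟩

-- ---- parity ----
lemma bond_key_odd (conf : List Char)
    (hconf : ∀ c ∈ conf, c = 'U' ∨ c = 'D' ∨ c = 'R' ∨ c = 'L')
    (gx gy : Int) (i : Nat) (hi : i < conf.length) :
    ((bondW conf gx gy i).1.1 + (bondW conf gx gy i).1.2 - gy - gx) % 2 = 1 := by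
  have hc : conf.getD i ' ' ∈ conf := by
    rw [List.getD_eq_getElem _ _ hi]
    exact List.getElem_mem hi
  have hdx : dxC (conf.getD i ' ') + dyC (conf.getD i ' ') = 1 ∨
      dxC (conf.getD i ' ') + dyC (conf.getD i ' ') = -1 := by
    rcases hconf _ hc with h | h | h | h <;> rw [h] <;> simp [dxC, dyC]
  have hX := Xc_succ conf i hi
  have hY := Yc_succ conf i hi
  unfold bondW
  simp only
  omega
lemma res_key_even (seq conf : List Char) (gx gy : Int) (i : Nat) :
    ((resW seq conf gx gy i).1.1 + (resW seq conf gx gy i).1.2 - gy - gx) % 2 = 0 := by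
  unfold resW
  simp only
  omega

lemma lastVal_interleaved (seq conf : List Char)
    (hconf : ∀ c ∈ conf, c = 'U' ∨ c = 'D' ∨ c = 'R' ∨ c = 'L')
    (gx gy : Int) (q : Int × Int) (D : String) :
    (lastVal (resW seq conf gx gy 0 :: (List.range conf.length).flatMap
        (fun i => [bondW conf gx gy i, resW seq conf gx gy (i + 1)])) q).getD D
    = (lastVal (resWs seq conf gx gy) q).getD ((lastVal (bondWs conf gx gy) q).getD D) := by
  by_cases hpar : (q.1 + q.2 - gy - gx) % 2 = 0
  · -- even cell: only residue writes can hit q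
    have hb : ∀ i : Nat, i < conf.length → ((bondW conf gx gy i).1 == q) = false := by
      intro i hi
      refine beq_eq_false_iff_ne.mpr (fun he => ?_)
      have hodd := bond_key_odd conf hconf gx gy i hi
      rw [he] at hodd
      omega
    have hbnone : lastVal (bondWs conf gx gy) q = none := by
      unfold lastVal bondWs
      rw [List.filter_eq_nil_iff.mpr (by
        intro w hw
        obtain ⟨i, hi, rfl⟩ := List.mem_map.mp hw
        simp [hb i (List.mem_range.mp hi)])]
      rfl
    have hfil : List.filter (fun w => w.1 == q)
        ((List.range conf.length).flatMap
          (fun i => [bondW conf gx gy i, resW seq conf gx gy (i + 1)]))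
        = List.filter (fun w => w.1 == q)
            ((List.range conf.length).map (fun i => resW seq conf gx gy (i + 1))) := by
      rw [List.filter_flatMap, ← flatMap_filter_singleton]
      refine List.flatMap_congr (fun i hi => ?_)
      rw [List.filter_cons, hb i (List.mem_range.mp hi)]
      simp
    have hres : resWs seq conf gx gy
        = resW seq conf gx gy 0 :: (List.range conf.length).map (fun i => resW seq conf gx gy (i + 1)) := by
      unfold resWs
      rw [List.range_succ_eq_map, List.map_cons, List.map_map]
      rfl
    rw [hbnone]
    unfold lastVal
    rw [hres, List.filter_cons, List.filter_cons, hfil]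
    rfl
  · -- odd cell: only bond writes can hit q
    have hr : ∀ i : Nat, ((resW seq conf gx gy i).1 == q) = false := by
      intro i
      refine beq_eq_false_iff_ne.mpr (fun he => ?_)
      have heven := res_key_even seq conf gx gy i
      rw [he] at heven
      omega
    have hrnone : lastVal (resWs seq conf gx gy) q = none := by
      unfold lastVal resWs
      rw [List.filter_eq_nil_iff.mpr (by
        intro w hw
        obtain ⟨i, hi, rfl⟩ := List.mem_map.mp hw
        simp [hr i])]
      rfl
    have hfil : List.filter (fun w => w.1 == q)
        ((List.range conf.length).flatMap
          (fun i => [bondW conf gx gy i, resW seq conf gx gy (i + 1)]))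
        = List.filter (fun w => w.1 == q) ((List.range conf.length).map (bondW conf gx gy)) := by
      rw [List.filter_flatMap, ← flatMap_filter_singleton]
      refine List.flatMap_congr (fun i hi => ?_)
      simp [List.filter_cons, hr (i + 1)]
    rw [hrnone]
    unfold lastVal
    rw [List.filter_cons, hr 0]
    simp only [Bool.false_eq_true, if_false]
    rw [hfil]
    rfl

-- ---- each port equals the canonical form ----
lemma rect_dots (H W : Nat) : Rect ((List.range H).map (dotsRow W)) H W := by
  refine ⟨by simp, fun r hr => ?_⟩
  rw [PySem.List.getD_map_range _ _ _ _ hr]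
  simp [dotsRow]

lemma readC_dots (H W : Nat) (r c : Nat) (hr : r < H) (hc : c < W) :
    readC ((List.range H).map (dotsRow W)) r c
    = (if r % 2 == 0 && c % 2 == 0 then "." else " ") := by
  unfold readC
  rw [PySem.List.getD_map_range _ _ _ _ hr]
  unfold dotsRow
  rw [PySem.List.getD_map_range _ _ _ _ hc]

lemma A_side (sequence configuration : String)
    (hconf : ∀ c ∈ configuration.toList, c = 'U' ∨ c = 'D' ∨ c = 'R' ∨ c = 'L') :
    build sequence configuration = canonical sequence.toList configuration.toList := by
  simp only [build, A_coords_eq]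
  set seq := sequence.toList with hseq
  set conf := configuration.toList with hconfdef
  rw [show (PySem.List.max? (xsL conf) fun x => x).getD 0 = xmaxC conf from rfl,
      show (PySem.List.min? (xsL conf) fun x => x).getD 0 = xminC conf from rfl,
      show (PySem.List.max? (ysL conf) fun x => x).getD 0 = ymaxC conf from rfl,
      show (PySem.List.min? (ysL conf) fun x => x).getD 0 = yminC conf from rfl]
  have hx0 := x_bounds conf 0 (by omega)
  have hy0 := y_bounds conf 0 (by omega)
  rw [Xc_zero] at hx0
  rw [Yc_zero] at hy0
  have hW := WC_cast conf
  have hH := HC_cast conf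
  rw [show |xmaxC conf + xmaxC conf + 3 - (xminC conf + xminC conf - 2)|
      = ((WC conf : Nat) : Int) from by rw [abs_of_nonneg (by omega)]; omega]
  rw [show |ymaxC conf + ymaxC conf + 3 - (yminC conf + yminC conf - 2)|
      = ((HC conf : Nat) : Int) from by rw [abs_of_nonneg (by omega)]; omega]
  rw [show (0 - (xminC conf + xminC conf - 2) : Int) = gxC conf from by unfold gxC; ring]
  rw [show (0 - (yminC conf + yminC conf - 2) : Int) = gyC conf from by unfold gyC; ring]
  rw [PySem.List.pyRange_zero_natCast, PySem.List.pyRange_zero_natCast, List.map_map]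
  rw [show ((fun (_ : Int) => List.map (fun (_ : Int) => " ")
          (List.map (fun (k : Nat) => (k : Int)) (List.range (WC conf))))
        ∘ (fun (k : Nat) => (k : Int))) = (fun (_ : Nat) => spRow (WC conf)) from by
    funext x
    simp only [Function.comp_apply]
    unfold spRow
    rw [List.map_map]
    exact List.map_congr_left (fun a _ => rfl)]
  rw [A_dots_eq]
  rw [show setCell ((List.range (HC conf)).map (dotsRow (WC conf))) (gyC conf) (gxC conf)
        (String.ofList [seq.getD 0 ' '])
      = applyW ((List.range (HC conf)).map (dotsRow (WC conf)))
          (resW seq conf (gxC conf) (gyC conf) 0) from by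
    unfold applyW resW
    rw [Xc_zero, Yc_zero]
    norm_num]
  rw [A_walk_eq]
  simp only
  rw [show applyWs (applyW ((List.range (HC conf)).map (dotsRow (WC conf)))
        (resW seq conf (gxC conf) (gyC conf) 0))
        ((List.range conf.length).flatMap
          (fun i => [bondW conf (gxC conf) (gyC conf) i, resW seq conf (gxC conf) (gyC conf) (i + 1)]))
      = applyWs ((List.range (HC conf)).map (dotsRow (WC conf)))
          (resW seq conf (gxC conf) (gyC conf) 0 :: (List.range conf.length).flatMap
            (fun i => [bondW conf (gxC conf) (gyC conf) i,
                       resW seq conf (gxC conf) (gyC conf) (i + 1)])) from rfl]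
  -- pointwise comparison
  have hrect := rect_dots (HC conf) (WC conf)
  have hws : ∀ w ∈ (resW seq conf (gxC conf) (gyC conf) 0 :: (List.range conf.length).flatMap
      (fun i => [bondW conf (gxC conf) (gyC conf) i,
                 resW seq conf (gxC conf) (gyC conf) (i + 1)])),
      InB (HC conf) (WC conf) w.1 := by
    intro w hw
    rcases List.mem_cons.mp hw with rfl | hw'
    · exact resW_inB seq conf 0 (by omega)
    · obtain ⟨i, hi, hw2⟩ := List.mem_flatMap.mp hw'
      have hi' := List.mem_range.mp hi
      simp only [List.mem_cons, List.not_mem_nil, or_false] at hw2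
      rcases hw2 with rfl | rfl
      · exact bondW_inB conf seq i hi'
      · exact resW_inB seq conf (i + 1) (by omega)
  have hrect2 := rect_applyWs _ _ _ _ hrect hws
  apply List.ext_getElem (by simp [hrect2.1, canonical])
  intro r h1 h2
  have hrH : r < HC conf := by rw [← hrect2.1]; exact h1
  apply List.ext_getElem
  · rw [← List.getD_eq_getElem _ [] h1, hrect2.2 r hrH]
    simp [canonical, PySem.List.getD_map_range _ _ _ _ hrH]
  intro c hc1 hc2
  have hcW : c < WC conf := by
    rw [← List.getD_eq_getElem _ [] h1, hrect2.2 r hrH] at hc1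
    exact hc1
  have hread := readC_applyWs _ _ (HC conf) (WC conf) hrect hws r c hrH hcW
  unfold readC at hread
  rw [List.getD_eq_getElem _ [] h1] at hread
  rw [List.getD_eq_getElem _ " " hc1] at hread
  have hd := readC_dots (HC conf) (WC conf) r c hrH hcW
  unfold readC at hd
  rw [hd] at hread
  refine hread.trans ?_
  rw [lastVal_interleaved seq conf hconf (gxC conf) (gyC conf) ((r : Int), (c : Int)) _]
  simp only [canonical, List.getElem_map, List.getElem_range]

lemma pyGetD_xsL (conf : List Char) (i : Nat) (hi : i ≤ conf.length) :
    PySem.List.pyGetD (xsL conf) (i : Int) 0 = Xc conf i := by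
  rw [PySem.List.pyGetD_natCast]
  unfold xsL
  rw [PySem.List.getD_map_range _ _ _ _ (by omega)]
lemma pyGetD_ysL (conf : List Char) (i : Nat) (hi : i ≤ conf.length) :
    PySem.List.pyGetD (ysL conf) (i : Int) 0 = Yc conf i := by
  rw [PySem.List.pyGetD_natCast]
  unfold ysL
  rw [PySem.List.getD_map_range _ _ _ _ (by omega)]

lemma lastVal_map (l : List Nat) (w : Nat → ((Int × Int) × String)) (q : Int × Int) :
    lastVal (l.map w) q = ((l.filter (fun i => (w i).1 == q)).getLast?).map (fun i => (w i).2) := by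
  unfold lastVal
  rw [List.filter_map, List.getLast?_map, Option.map_map]
  rfl

lemma getD_mk_nil (q : Int × Int) (dflt : String) :
    (PySem.Dict.mk ([] : List ((Int × Int) × String))).getD q dflt = dflt := rfl

lemma B_cells_getD (seq conf : List Char) (gx gy : Int) (q : Int × Int) (dflt : String) :
    (B_cellsDict seq conf (xsL conf) (ysL conf) gx gy).getD q dflt
    = (lastVal (resWs seq conf gx gy) q).getD
        ((lastVal (bondWs conf gx gy) q).getD dflt) := by
  unfold B_cellsDict
  rw [PySem.List.foldl_congr_mem (List.range conf.length)
      _ (fun d i => d.insert (bondW conf gx gy i).1 (bondW conf gx gy i).2) _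
      (fun d i hi => by
        have hi' := List.mem_range.mp hi
        rw [show ((i : Int) + 1) = (((i + 1 : Nat) : Nat) : Int) by push_cast; ring]
        rw [pyGetD_xsL conf i (by omega), pyGetD_ysL conf i (by omega),
            pyGetD_xsL conf (i + 1) (by omega), pyGetD_ysL conf (i + 1) (by omega)]
        rfl)]
  rw [PySem.List.foldl_congr_mem (List.range (conf.length + 1))
      _ (fun d i => d.insert (resW seq conf gx gy i).1 (resW seq conf gx gy i).2) _
      (fun d i hi => by
        have hi' := List.mem_range.mp hi
        rw [pyGetD_xsL conf i (by omega), pyGetD_ysL conf i (by omega)]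
        rfl)]
  rw [getD_foldl_insert, getD_foldl_insert, getD_mk_nil]
  unfold resWs bondWs
  rw [lastVal_map, lastVal_map]

lemma mod2_beq_cast (r : Nat) : (PySem.Int.mod (r : Int) 2 == 0) = (r % 2 == 0) := by
  rw [show (2 : Int) = ((2 : Nat) : Int) from rfl, PySem.Int.mod_natCast]
  rcases Nat.mod_two_eq_zero_or_one r with h | h <;> rw [h] <;> rfl

lemma B_side (sequence configuration : String) :
    build_alt sequence configuration = canonical sequence.toList configuration.toList := by
  simp only [build_alt, B_coords_eq]
  rw [show (2 * ((PySem.List.max? (ysL configuration.toList) fun x => x).getD 0 -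
        (PySem.List.min? (ysL configuration.toList) fun x => x).getD 0) + 5 : Int)
      = ((HC configuration.toList : Nat) : Int) from (HC_cast configuration.toList).symm]
  rw [show (2 * ((PySem.List.max? (xsL configuration.toList) fun x => x).getD 0 -
        (PySem.List.min? (xsL configuration.toList) fun x => x).getD 0) + 5 : Int)
      = ((WC configuration.toList : Nat) : Int) from (WC_cast configuration.toList).symm]
  rw [PySem.List.pyRange_zero_natCast, PySem.List.pyRange_zero_natCast,
      List.map_map]
  unfold canonical
  refine List.map_congr_left (fun r hr => ?_)
  rw [Function.comp_apply, List.map_map]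
  refine List.map_congr_left (fun c hc => ?_)
  rw [Function.comp_apply]
  rw [show (2 - 2 * (PySem.List.min? (xsL configuration.toList) fun x => x).getD 0 : Int)
      = gxC configuration.toList from rfl]
  rw [show (2 - 2 * (PySem.List.min? (ysL configuration.toList) fun x => x).getD 0 : Int)
      = gyC configuration.toList from rfl]
  rw [B_cells_getD, mod2_beq_cast, mod2_beq_cast]

-- ===== VERDICT (by name: the statement is the Claim_ definition above) =====
theorem build_spec : Claim_equal_build := by
  intro sequence configuration _hDom hPre
  unfold Spec_build
  obtain ⟨hall, _hlen⟩ := hPre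
  have hconf : ∀ c ∈ configuration.toList, c = 'U' ∨ c = 'D' ∨ c = 'R' ∨ c = 'L' := by
    intro c hc
    have := List.all_eq_true.mp hall c hc
    simp only [Bool.or_eq_true, beq_iff_eq] at this
    tauto
  rw [A_side sequence configuration hconf, B_side sequence configuration]
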